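-- pv_equiv track=rewrite | github.com/AxtonH/Prezo | backend/app/artifact_css_tree.py | _split_css_statements
-- ===== SOURCE A (Python) =====
-- def _split_css_statements(body: str) -> list[str]:
--     statements: list[str] = []
--     start = 0
--     depth_parenthesis = 0
--     depth_brackets = 0
--     index = 0
--     length = len(body)
--
--     while index < length:
--         char = body[index]
--         next_char = body[index + 1] if index + 1 < length else ""
--         if char == "/" and next_char == "*":
--             index = _advance_past_comment(body, index, length)
--             continue
--         if char in {"'", '"'}:
--             index = _advance_past_string(body, index, length)
--             continue
--         if char == "(":
--             depth_parenthesis += 1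
--         elif char == ")" and depth_parenthesis > 0:
--             depth_parenthesis -= 1
--         elif char == "[":
--             depth_brackets += 1
--         elif char == "]" and depth_brackets > 0:
--             depth_brackets -= 1
--         elif char == ";" and depth_parenthesis == 0 and depth_brackets == 0:
--             statements.append(body[start:index])
--             start = index + 1
--         index += 1
--
--     tail = body[start:]
--     if tail.strip():
--         statements.append(tail)
--     return statements
--
-- def _advance_past_comment(text: str, start_index: int, end_index: int) -> int:
--     close_index = text.find("*/", start_index + 2, end_index)
--     if close_index < 0:
--         return end_index
--     return close_index + 2
--
-- def _advance_past_string(text: str, start_index: int, end_index: int) -> int: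
--     quote = text[start_index]
--     index = start_index + 1
--     while index < end_index:
--         char = text[index]
--         if char == "\\":
--             index += 2
--             continue
--         if char == quote:
--             return index + 1
--         index += 1
--     return end_index
-- ===== SOURCE B (Python) =====
-- def _split_css_statements(body: str) -> list[str]:
--     NORMAL, STRING, COMMENT = 0, 1, 2
--     statements: list[str] = []
--     cur: list[str] = []
--     depth_par = 0
--     depth_brk = 0
--     state = NORMAL
--     quote = ""
--     escape = False
--     star = False
--     i = 0
--     n = len(body)
--     while i < n:
--         c = body[i]
--         if state == STRING:
--             cur.append(c)
--             if escape:
--                 escape = False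
--             elif c == "\\":
--                 escape = True
--             elif c == quote:
--                 state = NORMAL
--         elif state == COMMENT:
--             cur.append(c)
--             if star and c == "/":
--                 state = NORMAL
--             else:
--                 star = c == "*"
--         else:
--             if c == "/" and i + 1 < n and body[i + 1] == "*":
--                 cur.append("/")
--                 cur.append("*")
--                 state = COMMENT
--                 star = False
--                 i += 2
--                 continue
--             if c in ("'", '"'):
--                 cur.append(c)
--                 state = STRING
--                 quote = c
--                 escape = False
--             elif c == "(":
--                 cur.append(c)
--                 depth_par += 1
--             elif c == ")" and depth_par > 0:
--                 cur.append(c)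
--                 depth_par -= 1
--             elif c == "[":
--                 cur.append(c)
--                 depth_brk += 1
--             elif c == "]" and depth_brk > 0:
--                 cur.append(c)
--                 depth_brk -= 1
--             elif c == ";" and depth_par == 0 and depth_brk == 0:
--                 statements.append("".join(cur))
--                 cur = []
--             else:
--                 cur.append(c)
--         i += 1
--     tail = "".join(cur)
--     if tail.strip():
--         statements.append(tail)
--     return statements
-- ===== Notes on version B (the rewrite author's own statement) =====
-- stated objective: alternative
-- what changed: Replaced A's index-jumping main loop that calls helper sub-scanners (find-based comment skip, separate string-scanner loop) and slices statements out by saved indices with one flat per-character state machine (NORMAL/IN_STRING/IN_COMMENT plus escape and star flags) that accumulates the current statement in a buffer.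
import Mathlib
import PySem

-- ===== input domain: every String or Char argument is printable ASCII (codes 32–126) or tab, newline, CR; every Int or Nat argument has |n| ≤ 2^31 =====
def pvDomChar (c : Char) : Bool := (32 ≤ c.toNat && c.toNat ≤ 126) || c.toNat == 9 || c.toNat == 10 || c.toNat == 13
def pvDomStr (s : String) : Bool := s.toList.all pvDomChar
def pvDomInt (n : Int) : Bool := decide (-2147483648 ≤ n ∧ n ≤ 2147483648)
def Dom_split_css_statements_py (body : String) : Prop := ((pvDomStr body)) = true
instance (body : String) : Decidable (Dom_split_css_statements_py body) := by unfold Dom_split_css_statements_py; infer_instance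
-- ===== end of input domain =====

-- B replaces A's index-jumping loop that calls helper sub-scanners (find-based comment skip,
-- separate string-scanner) and slices statements out by saved indices with one flat per-character
-- state machine (NORMAL / IN_STRING / IN_COMMENT with escape and star flags) that accumulates the
-- current statement in a buffer; same cost, different decomposition ("alternative").
-- Loops are ported with a structural fuel parameter chosen large enough for every iteration
-- (a totality guard only; it never changes a computed value).

-- ===== PORT A =====
-- exact port of Python's text.find("*/", i, n): smallest j ≥ i with j+2 ≤ n, text[j]='*',
-- text[j+1]='/', else -1; fuel ≥ n-i-1 bounds the scan
def pvFindStarSlash (text : List Char) (fuel i n : Nat) : Int :=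
  match fuel with
  | 0 => -1
  | fuel+1 =>
    if i + 2 ≤ n then
      if text.getD i ' ' = '*' ∧ text.getD (i+1) ' ' = '/' then (i : Int)
      else pvFindStarSlash text fuel (i+1) n
    else -1

def advance_past_comment_py (text : List Char) (startIndex endIndex : Nat) : Nat :=
  let closeIndex := pvFindStarSlash text endIndex (startIndex + 2) endIndex
  if closeIndex < 0 then endIndex else closeIndex.toNat + 2

-- the while-loop of _advance_past_string (index starts at start_index + 1); fuel ≥ n-i
def pvStrScan (text : List Char) (quote : Char) (fuel i n : Nat) : Nat :=
  match fuel with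
  | 0 => n
  | fuel+1 =>
    if i < n then
      if text.getD i ' ' = '\\' then pvStrScan text quote fuel (i+2) n
      else if text.getD i ' ' = quote then i + 1
      else pvStrScan text quote fuel (i+1) n
    else n

def advance_past_string_py (text : List Char) (startIndex endIndex : Nat) : Nat :=
  -- quote = text[start_index]; in range at every call site (loop guard index < length)
  pvStrScan text (text.getD startIndex ' ') endIndex (startIndex + 1) endIndex

def pvLoopA (body : List Char) (fuel n : Nat) (stmts : List (List Char)) (start dp db i : Nat) :
    List (List Char) :=
  match fuel with
  | 0 =>  -- unreachable at the stated fuel (> n - i); same value as the loop-exit arm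
    let tail := PySem.List.slice body (some (start : Int)) none
    if (PySem.Chars.strip tail).isEmpty then stmts else stmts ++ [tail]
  | fuel+1 =>
    if i < n then
      -- char = body[index]; next_char = body[index+1] if index+1 < length else "" (ported as Option, "" = none)
      if body.getD i ' ' = '/' ∧ (if i + 1 < n then some (body.getD (i+1) ' ') else none) = some '*' then
        pvLoopA body fuel n stmts start dp db (advance_past_comment_py body i n)
      else if body.getD i ' ' = '\'' ∨ body.getD i ' ' = '"' then
        pvLoopA body fuel n stmts start dp db (advance_past_string_py body i n)
      else if body.getD i ' ' = '(' then pvLoopA body fuel n stmts start (dp+1) db (i+1)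
      else if body.getD i ' ' = ')' ∧ 0 < dp then pvLoopA body fuel n stmts start (dp-1) db (i+1)
      else if body.getD i ' ' = '[' then pvLoopA body fuel n stmts start dp (db+1) (i+1)
      else if body.getD i ' ' = ']' ∧ 0 < db then pvLoopA body fuel n stmts start dp (db-1) (i+1)
      else if body.getD i ' ' = ';' ∧ dp = 0 ∧ db = 0 then
        pvLoopA body fuel n (stmts ++ [PySem.List.slice body (some (start : Int)) (some (i : Int))]) (i+1) dp db (i+1)
      else pvLoopA body fuel n stmts start dp db (i+1)
    else
      let tail := PySem.List.slice body (some (start : Int)) none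
      if (PySem.Chars.strip tail).isEmpty then stmts else stmts ++ [tail]

def split_css_statements_py (body : String) : List String :=
  (pvLoopA body.toList (body.toList.length + 1) body.toList.length [] 0 0 0 0).map String.ofList

-- ===== PORT B =====
inductive PvScan where
  | normal : PvScan
  | instring : Char → Bool → PvScan
  | incomment : Bool → PvScan
deriving DecidableEq, Repr

def pvLoopB (fuel : Nat) (stmts : List (List Char)) (cur : List Char) (dp db : Nat)
    (st : PvScan) (l : List Char) : List (List Char) :=
  match l with
  | [] => if (PySem.Chars.strip cur).isEmpty then stmts else stmts ++ [cur]
  | c :: rest =>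
    match fuel with
    | 0 => if (PySem.Chars.strip cur).isEmpty then stmts else stmts ++ [cur]  -- unreachable at the stated fuel (≥ length)
    | fuel+1 =>
      match st with
      | .instring q esc =>
        if esc then pvLoopB fuel stmts (cur ++ [c]) dp db (.instring q false) rest
        else if c = '\\' then pvLoopB fuel stmts (cur ++ [c]) dp db (.instring q true) rest
        else if c = q then pvLoopB fuel stmts (cur ++ [c]) dp db .normal rest
        else pvLoopB fuel stmts (cur ++ [c]) dp db (.instring q false) rest
      | .incomment star =>
        if star ∧ c = '/' then pvLoopB fuel stmts (cur ++ [c]) dp db .normal rest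
        else pvLoopB fuel stmts (cur ++ [c]) dp db (.incomment (c = '*')) rest
      | .normal =>
        if c = '/' ∧ rest.head? = some '*' then
          pvLoopB fuel stmts (cur ++ [c, '*']) dp db (.incomment false) rest.tail
        else if c = '\'' ∨ c = '"' then pvLoopB fuel stmts (cur ++ [c]) dp db (.instring c false) rest
        else if c = '(' then pvLoopB fuel stmts (cur ++ [c]) (dp+1) db .normal rest
        else if c = ')' ∧ 0 < dp then pvLoopB fuel stmts (cur ++ [c]) (dp-1) db .normal rest
        else if c = '[' then pvLoopB fuel stmts (cur ++ [c]) dp (db+1) .normal rest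
        else if c = ']' ∧ 0 < db then pvLoopB fuel stmts (cur ++ [c]) dp (db-1) .normal rest
        else if c = ';' ∧ dp = 0 ∧ db = 0 then pvLoopB fuel (stmts ++ [cur]) [] dp db .normal rest
        else pvLoopB fuel stmts (cur ++ [c]) dp db .normal rest

def split_css_statements_py_alt (body : String) : List String :=
  (pvLoopB body.toList.length [] [] 0 0 .normal body.toList).map String.ofList

-- ===== PRECONDITION & SPEC =====
def Spec_split_css_statements_py (body : String) (out : List String) : Prop := out = split_css_statements_py_alt body
instance (body : String) (out : List String) : Decidable (Spec_split_css_statements_py body out) := by unfold Spec_split_css_statements_py; infer_instance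

-- ===== CLAIM (what is proved, stated in full; the proofs are below) =====
def Claim_equal_split_css_statements_py : Prop := ∀ (body : String), Dom_split_css_statements_py body → Spec_split_css_statements_py body (split_css_statements_py body)

-- ===== LEMMAS AND PROOFS =====

-- segment body[a:b] as drop/take
def pvSeg (l : List Char) (a b : Nat) : List Char := (l.drop a).take (b - a)

theorem pvSeg_append (l : List Char) {a b c : Nat} (hab : a ≤ b) (hbc : b ≤ c) :
    pvSeg l a b ++ (l.drop b).take (c - b) = pvSeg l a c := by
  unfold pvSeg
  have h1 : (c - a) = (b - a) + (c - b) := by omega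
  rw [h1, List.take_add, List.drop_drop]
  have h2 : a + (b - a) = b := by omega
  rw [h2]

theorem pvDropCons (l : List Char) {i : Nat} (h : i < l.length) :
    l.drop i = l.getD i ' ' :: l.drop (i + 1) := by
  rw [List.getD_eq_getElem l ' ' h]
  exact List.drop_eq_getElem_cons h

theorem pvSeg_snoc (l : List Char) {a b : Nat} (hab : a ≤ b) (hb : b < l.length) :
    pvSeg l a b ++ [l.getD b ' '] = pvSeg l a (b + 1) := by
  rw [← pvSeg_append l hab (show b ≤ b + 1 by omega)]
  congr 1
  rw [pvDropCons l hb]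
  simp

theorem pvSeg_full (l : List Char) {a : Nat} (ha : a ≤ l.length) :
    pvSeg l a l.length = l.drop a := by
  unfold pvSeg
  apply List.take_of_length_le
  simp only [List.length_drop]
  omega

theorem pvSeg_refl (l : List Char) (a : Nat) : pvSeg l a a = [] := by
  simp [pvSeg]

theorem pvTakeCons (cur xs : List Char) (c : Char) {k e : Nat} (he : k + 1 ≤ e) :
    (cur ++ [c]) ++ xs.take (e - (k+1)) = cur ++ (c :: xs).take (e - k) := by
  have h1 : e - k = (e - (k+1)) + 1 := by omega
  rw [h1, List.take_succ_cons, List.append_assoc]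
  rfl

theorem pvFindStarSlash_bounds (text : List Char) (n : Nat) : ∀ (fuel i : Nat),
    0 ≤ pvFindStarSlash text fuel i n →
    (i : Int) ≤ pvFindStarSlash text fuel i n ∧ pvFindStarSlash text fuel i n + 2 ≤ n := by
  intro fuel
  induction fuel with
  | zero => intro i h0; simp [pvFindStarSlash] at h0
  | succ f ih =>
    intro i
    simp only [pvFindStarSlash]
    by_cases h : i + 2 ≤ n
    · rw [if_pos h]
      by_cases hpat : text.getD i ' ' = '*' ∧ text.getD (i+1) ' ' = '/'
      · rw [if_pos hpat]; intro _; constructor <;> omega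
      · rw [if_neg hpat]; intro h0
        have := ih (i+1) h0; omega
    · rw [if_neg h]; intro h0; omega

theorem pvStrScan_bounds (text : List Char) (q : Char) (n : Nat) : ∀ (fuel i : Nat),
    min i n ≤ pvStrScan text q fuel i n ∧ pvStrScan text q fuel i n ≤ n := by
  intro fuel
  induction fuel with
  | zero => intro i; simp [pvStrScan]
  | succ f ih =>
    intro i
    simp only [pvStrScan]
    by_cases h : i < n
    · rw [if_pos h]
      by_cases hc : text.getD i ' ' = '\\'
      · simp only [if_pos hc]
        have := ih (i+2); omega
      · by_cases hq : text.getD i ' ' = q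
        · simp only [if_neg hc, if_pos hq]; omega
        · simp only [if_neg hc, if_neg hq]
          have := ih (i+1); omega
    · rw [if_neg h]; omega

theorem pvStrScan_of_ge (text : List Char) (q : Char) (fuel i n : Nat) (h : n ≤ i) :
    pvStrScan text q fuel i n = n := by
  cases fuel with
  | zero => rfl
  | succ f => simp only [pvStrScan]; rw [if_neg (by omega)]

-- fuel irrelevance for the string sub-scanner: any fuel ≥ n - i computes the same index
theorem pvStrScan_irrel (text : List Char) (q : Char) (n : Nat) : ∀ (f1 f2 i : Nat),
    n - i ≤ f1 → n - i ≤ f2 → pvStrScan text q f1 i n = pvStrScan text q f2 i n := by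
  intro f1
  induction f1 with
  | zero =>
    intro f2 i h1 h2
    rw [pvStrScan_of_ge text q 0 i n (by omega), pvStrScan_of_ge text q f2 i n (by omega)]
  | succ f ih =>
    intro f2 i h1 h2
    by_cases h : i < n
    · cases f2 with
      | zero => omega
      | succ g =>
        simp only [pvStrScan]
        rw [if_pos h, if_pos h]
        by_cases hc : text.getD i ' ' = '\\'
        · simp only [if_pos hc]; exact ih g (i+2) (by omega) (by omega)
        · by_cases hq : text.getD i ' ' = q
          · simp only [if_neg hc, if_pos hq]
          · simp only [if_neg hc, if_neg hq]; exact ih g (i+1) (by omega) (by omega)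
    · rw [pvStrScan_of_ge text q _ i n (by omega), pvStrScan_of_ge text q f2 i n (by omega)]

-- one unfolding step of the string sub-scanner, staying at the same (sufficient) fuel
theorem pvStrScan_step (text : List Char) (q : Char) {f i n : Nat} (h : i < n) (hf : n - i ≤ f) :
    pvStrScan text q f i n =
      (if text.getD i ' ' = '\\' then pvStrScan text q f (i+2) n
       else if text.getD i ' ' = q then i + 1
       else pvStrScan text q f (i+1) n) := by
  cases f with
  | zero => omega
  | succ g =>
    simp only [pvStrScan]
    rw [if_pos h]
    by_cases hc : text.getD i ' ' = '\\'
    · simp only [if_pos hc]; exact pvStrScan_irrel text q n g (g+1) (i+2) (by omega) (by omega)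
    · by_cases hq : text.getD i ' ' = q
      · simp only [if_neg hc, if_pos hq]
      · simp only [if_neg hc, if_neg hq]
        exact pvStrScan_irrel text q n g (g+1) (i+1) (by omega) (by omega)

theorem pv_adv_comment_bounds (text : List Char) (i n : Nat) (h : i < n) :
    i < advance_past_comment_py text i n ∧ advance_past_comment_py text i n ≤ n := by
  unfold advance_past_comment_py
  by_cases h0 : pvFindStarSlash text n (i + 2) n < 0
  · simp only [if_pos h0]; omega
  · have := pvFindStarSlash_bounds text n n (i + 2) (by omega)
    simp only [if_neg h0]; omega

theorem pv_adv_string_bounds (text : List Char) (i n : Nat) (h : i < n) :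
    i < advance_past_string_py text i n ∧ advance_past_string_py text i n ≤ n := by
  unfold advance_past_string_py
  have := pvStrScan_bounds text (text.getD i ' ') n n (i + 1)
  omega

-- the first position where B's comment scanner leaves the comment (proof-side characterisation)
def pvCloseFrom (l : List Char) (k n : Nat) (star : Bool) : Option Nat :=
  if h : k < n then
    if star ∧ l.getD k ' ' = '/' then some k
    else pvCloseFrom l (k+1) n (decide (l.getD k ' ' = '*'))
  else none
termination_by n - k

def pvCEnd (l : List Char) (k : Nat) (star : Bool) : Nat :=
  match pvCloseFrom l k l.length star with
  | some m => m + 1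
  | none => l.length

theorem pvCloseFrom_bounds (l : List Char) (k n : Nat) (star : Bool) {m : Nat}
    (h : pvCloseFrom l k n star = some m) : k ≤ m ∧ m < n := by
  induction hfuel : n - k using Nat.strong_induction_on generalizing k star with
  | _ fuel ih =>
  by_cases hk : k < n
  · rw [pvCloseFrom, dif_pos hk] at h
    by_cases hcl : star ∧ l.getD k ' ' = '/'
    · rw [if_pos hcl] at h
      injection h with h; omega
    · rw [if_neg hcl] at h
      have := ih (n - (k+1)) (by omega) (k+1) _ h rfl
      omega
  · rw [pvCloseFrom, dif_neg hk] at h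
    exact absurd h (by simp)

theorem pvCEnd_bounds (l : List Char) (k : Nat) (star : Bool) (h : k ≤ l.length) :
    k ≤ pvCEnd l k star ∧ pvCEnd l k star ≤ l.length := by
  unfold pvCEnd
  cases hc : pvCloseFrom l k l.length star with
  | none => simp only [hc]; omega
  | some m =>
    simp only [hc]
    have := pvCloseFrom_bounds l k l.length star hc; omega

theorem pvCloseFrom_eq_find (l : List Char) (n : Nat) : ∀ (f k : Nat) (star : Bool),
    n - k ≤ f + 1 →
    pvCloseFrom l k n star =
      (if star ∧ (k < n ∧ l.getD k ' ' = '/') then some k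
       else if pvFindStarSlash l f k n < 0 then none
            else some ((pvFindStarSlash l f k n).toNat + 1)) := by
  intro f
  induction f with
  | zero =>
    intro k star hf
    by_cases hk : k < n
    · rw [pvCloseFrom, dif_pos hk]
      by_cases hcl : star = true ∧ l.getD k ' ' = '/'
      · rw [if_pos hcl, if_pos ⟨hcl.1, hk, hcl.2⟩]
      · rw [if_neg hcl, if_neg (by tauto)]
        rw [pvCloseFrom, dif_neg (by omega)]
        simp [pvFindStarSlash]
    · rw [pvCloseFrom, dif_neg hk]
      rw [if_neg (by rintro ⟨_, hlt, _⟩; omega)]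
      simp [pvFindStarSlash]
  | succ f ih =>
    intro k star hf
    by_cases hk : k < n
    · rw [pvCloseFrom, dif_pos hk]
      by_cases hcl : star = true ∧ l.getD k ' ' = '/'
      · rw [if_pos hcl, if_pos ⟨hcl.1, hk, hcl.2⟩]
      · rw [if_neg hcl, if_neg (by tauto)]
        rw [ih (k+1) _ (by omega)]
        by_cases hn2 : k + 2 ≤ n
        · have hfind : pvFindStarSlash l (f+1) k n =
              if l.getD k ' ' = '*' ∧ l.getD (k+1) ' ' = '/' then (k : Int)
              else pvFindStarSlash l f (k+1) n := by
            simp only [pvFindStarSlash]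
            rw [if_pos hn2]
          rw [hfind]
          by_cases hpat : l.getD k ' ' = '*' ∧ l.getD (k+1) ' ' = '/'
          · rw [if_pos hpat]
            rw [if_pos (by exact ⟨by simpa using hpat.1, by omega, hpat.2⟩)]
            rw [if_neg (by omega)]
            norm_num
          · rw [if_neg hpat]
            rw [if_neg (by simp only [decide_eq_true_eq]; rintro ⟨h1, _, h2⟩; exact hpat ⟨h1, h2⟩)]
        · -- k + 2 > n, so k = n - 1: the scan is already at the last character
          have hfind : pvFindStarSlash l (f+1) k n = -1 := by
            simp only [pvFindStarSlash]
            rw [if_neg hn2]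
          have hfind1 : pvFindStarSlash l f (k+1) n = -1 := by
            cases f with
            | zero => rfl
            | succ g =>
              simp only [pvFindStarSlash]
              rw [if_neg (by omega)]
          rw [hfind, hfind1]
          rw [if_neg (by simp only [decide_eq_true_eq]; rintro ⟨_, hlt, _⟩; omega)]
    · rw [pvCloseFrom, dif_neg hk]
      rw [if_neg (by rintro ⟨_, hlt, _⟩; omega)]
      have hfind : pvFindStarSlash l (f+1) k n = -1 := by
        simp only [pvFindStarSlash]
        rw [if_neg (by omega)]
      rw [hfind]
      norm_num

-- fuel irrelevance for B's machine: any fuel ≥ the number of remaining characters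
theorem pvLoopB_fuel_irrel : ∀ (f1 f2 : Nat) (stmts : List (List Char)) (cur : List Char)
    (dp db : Nat) (st : PvScan) (l : List Char), l.length ≤ f1 → l.length ≤ f2 →
    pvLoopB f1 stmts cur dp db st l = pvLoopB f2 stmts cur dp db st l := by
  intro f1
  induction f1 with
  | zero =>
    intro f2 stmts cur dp db st l h1 h2
    have : l = [] := List.eq_nil_of_length_eq_zero (by omega)
    subst this
    simp [pvLoopB]
  | succ f ih =>
    intro f2 stmts cur dp db st l h1 h2
    cases l with
    | nil => simp [pvLoopB]
    | cons c rest =>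
      cases f2 with
      | zero => simp at h2
      | succ g =>
        have hr : rest.length ≤ f := by simp at h1; omega
        have hr2 : rest.length ≤ g := by simp at h2; omega
        have hrt : rest.tail.length ≤ f := by rw [List.length_tail]; omega
        have hrt2 : rest.tail.length ≤ g := by rw [List.length_tail]; omega
        cases st with
        | normal =>
          simp only [pvLoopB]
          by_cases hA : c = '/' ∧ rest.head? = some '*'
          · rw [if_pos hA, if_pos hA]; exact ih g _ _ _ _ _ _ hrt hrt2
          · rw [if_neg hA, if_neg hA]
            by_cases hB : c = '\'' ∨ c = '"'
            · rw [if_pos hB, if_pos hB]; exact ih g _ _ _ _ _ _ hr hr2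
            · rw [if_neg hB, if_neg hB]
              by_cases hC : c = '('
              · rw [if_pos hC, if_pos hC]; exact ih g _ _ _ _ _ _ hr hr2
              · rw [if_neg hC, if_neg hC]
                by_cases hD : c = ')' ∧ 0 < dp
                · rw [if_pos hD, if_pos hD]; exact ih g _ _ _ _ _ _ hr hr2
                · rw [if_neg hD, if_neg hD]
                  by_cases hE : c = '['
                  · rw [if_pos hE, if_pos hE]; exact ih g _ _ _ _ _ _ hr hr2
                  · rw [if_neg hE, if_neg hE]
                    by_cases hF : c = ']' ∧ 0 < db
                    · rw [if_pos hF, if_pos hF]; exact ih g _ _ _ _ _ _ hr hr2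
                    · rw [if_neg hF, if_neg hF]
                      by_cases hG : c = ';' ∧ dp = 0 ∧ db = 0
                      · rw [if_pos hG, if_pos hG]; exact ih g _ _ _ _ _ _ hr hr2
                      · rw [if_neg hG, if_neg hG]; exact ih g _ _ _ _ _ _ hr hr2
        | instring q esc =>
          simp only [pvLoopB]
          cases esc with
          | true => simp only [if_true]; exact ih g _ _ _ _ _ _ hr hr2
          | false =>
            simp only [Bool.false_eq_true, if_false]
            by_cases hB : c = '\\'
            · rw [if_pos hB, if_pos hB]; exact ih g _ _ _ _ _ _ hr hr2
            · rw [if_neg hB, if_neg hB]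
              by_cases hq : c = q
              · rw [if_pos hq, if_pos hq]; exact ih g _ _ _ _ _ _ hr hr2
              · rw [if_neg hq, if_neg hq]; exact ih g _ _ _ _ _ _ hr hr2
        | incomment star =>
          simp only [pvLoopB]
          by_cases hS : star = true ∧ c = '/'
          · rw [if_pos hS, if_pos hS]; exact ih g _ _ _ _ _ _ hr hr2
          · rw [if_neg hS, if_neg hS]; exact ih g _ _ _ _ _ _ hr hr2

theorem pvCommentRun (l : List Char) : ∀ (fuel k : Nat) (star : Bool)
    (stmts : List (List Char)) (cur : List Char) (dp db : Nat),
    l.length - k ≤ fuel → k ≤ l.length →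
    pvLoopB fuel stmts cur dp db (.incomment star) (l.drop k) =
      pvLoopB (l.length - pvCEnd l k star) stmts (cur ++ (l.drop k).take (pvCEnd l k star - k))
        dp db .normal (l.drop (pvCEnd l k star)) := by
  intro fuel
  induction fuel with
  | zero =>
    intro k star stmts cur dp db hf hk
    have hk' : k = l.length := by omega
    subst hk'
    have he : pvCEnd l l.length star = l.length := by
      unfold pvCEnd; rw [pvCloseFrom, dif_neg (by omega)]
    rw [he, List.drop_length]
    simp [pvLoopB]
  | succ f ih =>
    intro k star stmts cur dp db hf hk
    by_cases h : k < l.length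
    · rw [pvDropCons l h]
      by_cases hcl : star = true ∧ l.getD k ' ' = '/'
      · have he : pvCEnd l k star = k + 1 := by
          unfold pvCEnd
          rw [pvCloseFrom, dif_pos h, if_pos hcl]
        rw [he]
        simp only [pvLoopB]
        rw [if_pos hcl]
        have h1 : k + 1 - k = 1 := by omega
        rw [h1, List.take_succ_cons, List.take_zero]
        exact pvLoopB_fuel_irrel f (l.length - (k+1)) _ _ _ _ _ _ (by simp; omega) (by simp)
      · have he : pvCEnd l k star = pvCEnd l (k+1) (decide (l.getD k ' ' = '*')) := by
          unfold pvCEnd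
          conv_lhs => rw [pvCloseFrom, dif_pos h, if_neg hcl]
        rw [he]
        simp only [pvLoopB]
        rw [if_neg hcl]
        rw [ih (k+1) _ stmts (cur ++ [l.getD k ' ']) dp db (by omega) (by omega)]
        rw [pvTakeCons cur _ _ (pvCEnd_bounds l (k+1) _ (by omega)).1]
    · have hk' : k = l.length := by omega
      subst hk'
      have he : pvCEnd l l.length star = l.length := by
        unfold pvCEnd; rw [pvCloseFrom, dif_neg (by omega)]
      rw [he, List.drop_length]
      simp [pvLoopB]

theorem pvStringRun (l : List Char) : ∀ (fuel k : Nat) (q : Char)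
    (stmts : List (List Char)) (cur : List Char) (dp db : Nat),
    l.length - k ≤ fuel → k ≤ l.length →
    pvLoopB fuel stmts cur dp db (.instring q false) (l.drop k) =
      pvLoopB (l.length - pvStrScan l q l.length k l.length) stmts
        (cur ++ (l.drop k).take (pvStrScan l q l.length k l.length - k)) dp db .normal
        (l.drop (pvStrScan l q l.length k l.length)) := by
  intro fuel
  induction fuel using Nat.strong_induction_on with
  | _ fuel ih =>
  intro k q stmts cur dp db hf hk
  by_cases h : k < l.length
  · cases fuel with
    | zero => omega
    | succ f =>
      rw [pvDropCons l h]
      rw [pvStrScan_step l q h (by omega)]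
      by_cases hbs : l.getD k ' ' = '\\'
      · simp only [if_pos hbs]
        simp only [pvLoopB, Bool.false_eq_true, if_false]
        rw [if_pos hbs]
        by_cases hk1 : k + 1 < l.length
        · rw [pvDropCons l hk1]
          cases f with
          | zero => omega
          | succ f2 =>
            simp only [pvLoopB, if_true]
            rw [ih f2 (by omega) (k+2) q stmts ((cur ++ [l.getD k ' ']) ++ [l.getD (k+1) ' ']) dp db (by omega) (by omega)]
            have he2 : k + 2 ≤ pvStrScan l q l.length (k+2) l.length := by
              have := pvStrScan_bounds l q l.length l.length (k+2); omega
            rw [pvTakeCons (cur ++ [l.getD k ' ']) _ _ he2]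
            rw [pvTakeCons cur _ _ (by omega)]
        · have hd : l.drop (k+1) = [] := List.drop_of_length_le (by omega)
          have he2 : pvStrScan l q l.length (k+2) l.length = l.length :=
            pvStrScan_of_ge l q l.length (k+2) l.length (by omega)
          rw [hd, he2]
          have h1 : l.length - k = 1 := by omega
          rw [h1, List.take_succ_cons, List.take_zero, List.drop_length]
          simp [pvLoopB]
      · by_cases hq : l.getD k ' ' = q
        · simp only [if_neg hbs, if_pos hq]
          simp only [pvLoopB, Bool.false_eq_true, if_false]
          rw [if_neg hbs, if_pos hq]
          have h1 : k + 1 - k = 1 := by omega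
          rw [h1, List.take_succ_cons, List.take_zero]
          exact pvLoopB_fuel_irrel f (l.length - (k+1)) _ _ _ _ _ _ (by simp; omega) (by simp)
        · simp only [if_neg hbs, if_neg hq]
          simp only [pvLoopB, Bool.false_eq_true, if_false]
          rw [if_neg hbs, if_neg hq]
          rw [ih f (by omega) (k+1) q stmts (cur ++ [l.getD k ' ']) dp db (by omega) (by omega)]
          have he2 : k + 1 ≤ pvStrScan l q l.length (k+1) l.length := by
            have := pvStrScan_bounds l q l.length l.length (k+1); omega
          rw [pvTakeCons cur _ _ he2]
  · have hk' : k = l.length := by omega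
    subst hk'
    have he : pvStrScan l q l.length l.length l.length = l.length :=
      pvStrScan_of_ge l q l.length l.length l.length (by omega)
    rw [he, List.drop_length]
    simp [pvLoopB]

theorem pvMain (l : List Char) : ∀ (fuel start dp db i : Nat) (stmts : List (List Char)),
    l.length - i < fuel → start ≤ i → i ≤ l.length →
    pvLoopA l fuel l.length stmts start dp db i =
      pvLoopB (l.length - i) stmts (pvSeg l start i) dp db .normal (l.drop i) := by
  intro fuel
  induction fuel using Nat.strong_induction_on with
  | _ fuel ih =>
  intro start dp db i stmts hf hsi hin
  cases fuel with
  | zero => omega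
  | succ f =>
  by_cases h : i < l.length
  · simp only [pvLoopA]
    rw [if_pos h]
    have hsf : l.length - i = (l.length - (i+1)) + 1 := by omega
    rw [hsf, pvDropCons l h]
    simp only [pvLoopB]
    have hnext : (if i + 1 < l.length then some (l.getD (i+1) ' ') else none)
        = (l.drop (i+1)).head? := by
      by_cases h1 : i + 1 < l.length
      · rw [if_pos h1, List.head?_drop, List.getElem?_eq_getElem h1,
          List.getD_eq_getElem l ' ' h1]
      · rw [if_neg h1, List.head?_drop, List.getElem?_eq_none (by omega)]
    rw [hnext]
    by_cases hc1 : l.getD i ' ' = '/' ∧ (l.drop (i+1)).head? = some '*'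
    · rw [if_pos hc1, if_pos hc1]
      have hh := hc1.2
      rw [List.head?_drop] at hh
      obtain ⟨h1, h2⟩ := List.getElem?_eq_some_iff.mp hh
      have h2' : l.getD (i+1) ' ' = '*' := by
        rw [List.getD_eq_getElem l ' ' h1, h2]
      have hb := pv_adv_comment_bounds l i l.length h
      rw [ih f (by omega) start dp db _ stmts (by omega) (by omega) hb.2]
      rw [List.tail_drop]
      rw [pvCommentRun l (l.length - (i+1)) (i+2) false stmts _ dp db (by omega) (by omega)]
      have hi2 : i + 2 ≤ advance_past_comment_py l i l.length := by
        unfold advance_past_comment_py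
        by_cases h0 : pvFindStarSlash l l.length (i+2) l.length < 0
        · rw [if_pos h0]; omega
        · rw [if_neg h0]
          have := pvFindStarSlash_bounds l l.length l.length (i+2) (by omega)
          omega
      have hej : pvCEnd l (i+2) false = advance_past_comment_py l i l.length := by
        unfold pvCEnd advance_past_comment_py
        rw [pvCloseFrom_eq_find l l.length l.length (i+2) false (by omega)]
        rw [if_neg (by simp)]
        by_cases h0 : pvFindStarSlash l l.length (i+2) l.length < 0
        · rw [if_pos h0, if_pos h0]
        · rw [if_neg h0, if_neg h0]
      rw [hej]
      have hcur : pvSeg l start i ++ [l.getD i ' ', '*'] = pvSeg l start (i+2) := by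
        have hx : ([l.getD i ' ', '*'] : List Char) = [l.getD i ' '] ++ [l.getD (i+1) ' '] := by
          rw [h2']
          rfl
        rw [hx, ← List.append_assoc, pvSeg_snoc l hsi h, pvSeg_snoc l (by omega) h1]
      rw [hcur, pvSeg_append l (by omega) hi2]
    · rw [if_neg hc1, if_neg hc1]
      by_cases hc2 : l.getD i ' ' = '\'' ∨ l.getD i ' ' = '"'
      · rw [if_pos hc2, if_pos hc2]
        have hb := pv_adv_string_bounds l i l.length h
        rw [ih f (by omega) start dp db _ stmts (by omega) (by omega) hb.2]
        rw [pvStringRun l (l.length - (i+1)) (i+1) (l.getD i ' ') stmts _ dp db (by omega) (by omega)]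
        have hj : pvStrScan l (l.getD i ' ') l.length (i+1) l.length
            = advance_past_string_py l i l.length := rfl
        rw [hj]
        have he2 : i + 1 ≤ advance_past_string_py l i l.length := by omega
        rw [pvSeg_snoc l hsi h, pvSeg_append l (by omega) he2]
      · rw [if_neg hc2, if_neg hc2]
        by_cases hc3 : l.getD i ' ' = '('
        · rw [if_pos hc3, if_pos hc3]
          rw [ih f (by omega) start (dp+1) db (i+1) stmts (by omega) (by omega) (by omega)]
          rw [pvSeg_snoc l hsi h]
        · rw [if_neg hc3, if_neg hc3]
          by_cases hc4 : l.getD i ' ' = ')' ∧ 0 < dp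
          · rw [if_pos hc4, if_pos hc4]
            rw [ih f (by omega) start (dp-1) db (i+1) stmts (by omega) (by omega) (by omega)]
            rw [pvSeg_snoc l hsi h]
          · rw [if_neg hc4, if_neg hc4]
            by_cases hc5 : l.getD i ' ' = '['
            · rw [if_pos hc5, if_pos hc5]
              rw [ih f (by omega) start dp (db+1) (i+1) stmts (by omega) (by omega) (by omega)]
              rw [pvSeg_snoc l hsi h]
            · rw [if_neg hc5, if_neg hc5]
              by_cases hc6 : l.getD i ' ' = ']' ∧ 0 < db
              · rw [if_pos hc6, if_pos hc6]
                rw [ih f (by omega) start dp (db-1) (i+1) stmts (by omega) (by omega) (by omega)]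
                rw [pvSeg_snoc l hsi h]
              · rw [if_neg hc6, if_neg hc6]
                by_cases hc7 : l.getD i ' ' = ';' ∧ dp = 0 ∧ db = 0
                · rw [if_pos hc7, if_pos hc7]
                  have hslice : PySem.List.slice l (some (start : Int)) (some (i : Int))
                      = pvSeg l start i := by
                    rw [PySem.List.slice_natCast]; rfl
                  rw [hslice]
                  rw [ih f (by omega) (i+1) dp db (i+1) (stmts ++ [pvSeg l start i]) (by omega) (by omega) (by omega)]
                  rw [pvSeg_refl]
                · rw [if_neg hc7, if_neg hc7]
                  rw [ih f (by omega) start dp db (i+1) stmts (by omega) (by omega) (by omega)]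
                  rw [pvSeg_snoc l hsi h]
  · have hi : i = l.length := by omega
    subst hi
    simp only [pvLoopA]
    rw [if_neg (by omega), List.drop_length, pvSeg_full l hsi]
    simp only [pvLoopB, PySem.List.slice_from_natCast]

-- ===== VERDICT (by name: the statement is the Claim_ definition above) =====
theorem split_css_statements_py_spec : Claim_equal_split_css_statements_py := by
  intro body _
  unfold Spec_split_css_statements_py split_css_statements_py split_css_statements_py_alt
  congr 1
  have := pvMain body.toList (body.toList.length + 1) 0 0 0 0 [] (by omega) (by omega) (by omega)
  simpa [pvSeg] using this
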